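-- pv_equiv track=rewrite | github.com/SixingYan/Sketch-for-Data-Stream | experiment/compareCGM.py | getPathDict
-- ===== SOURCE A (Python) =====
-- def getPathDict(pathStr):
--     # input a string
--     pathDict = {}
--     pathDict['partID'] = []
--     pathDict['edgeType'] = []
--     preIndex = 0
--     for i in range(len(pathStr)):
--         if pathStr[i] == 'S' or pathStr[i] == 'C':
--             pathDict['partID'].append(int(pathStr[preIndex:i]))
--             if pathStr[i] == 'S':
--                 pathDict['edgeType'].append(0)
--             else:
--                 pathDict['edgeType'].append(1)
--             preIndex = i + 1
--     pathTem = pathStr[::-1]# reverse string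
--     idx = 0
--     for i in range(len(pathTem)):
--         if pathTem[i] == 'S' or pathTem[i] == 'C':
--             idx = i
--             break
--     pathDict['partID'].append(int(pathStr[-idx:]))
--     return pathDict
-- ===== SOURCE B (Python) =====
-- def getPathDict(pathStr):
--     # Single forward pass accumulating the current segment; no index slicing,
--     # no reverse scan. int() raises ValueError on unparseable segments, as in A.
--     segments, edgeType, cur = [], [], ''
--     for ch in pathStr:
--         if ch in 'SC':
--             segments.append(cur)
--             edgeType.append(0 if ch == 'S' else 1)
--             cur = ''
--         else:
--             cur += ch
--     segments.append(cur)
--     return {'partID': [int(s) for s in segments], 'edgeType': edgeType}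
-- ===== Notes on version B (the rewrite author's own statement) =====
-- stated objective: idiomatic
-- what changed: B replaces A's index loop with slices plus a separate reverse scan for the last separator by one forward pass that accumulates the current segment directly and appends the final segment at the end.
import Mathlib
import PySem

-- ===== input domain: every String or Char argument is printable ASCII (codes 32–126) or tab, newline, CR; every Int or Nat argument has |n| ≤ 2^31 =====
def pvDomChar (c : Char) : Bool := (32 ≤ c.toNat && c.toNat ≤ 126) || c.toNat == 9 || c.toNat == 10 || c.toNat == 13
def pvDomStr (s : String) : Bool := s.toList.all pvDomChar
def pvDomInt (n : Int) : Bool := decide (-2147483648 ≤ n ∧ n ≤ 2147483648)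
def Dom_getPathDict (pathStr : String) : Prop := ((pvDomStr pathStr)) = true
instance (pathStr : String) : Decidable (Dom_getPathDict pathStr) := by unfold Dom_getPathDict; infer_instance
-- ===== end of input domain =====

-- B replaces A's index loop with slices plus a separate reverse scan for the final
-- segment by one forward pass accumulating the current segment (objective: idiomatic).

-- shared helpers: the separator test, int() with a default (only reached under Pre_),
-- and the 0/1 edge encoding — used by both ports
def pvSep (c : Char) : Bool := c == 'S' || c == 'C'
def pvInt (cs : List Char) : Int := (PySem.Int.ofChars? cs).getD 0
def pvEdge (c : Char) : Int := if c == 'S' then 0 else 1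

-- ===== PORT A =====
-- second loop of A: 'idx = 0; for i in range(len(pathTem)): if sep: idx = i; break'
def pvFindSep : List Char → Int → Int
  | [], _ => 0
  | c :: t, i => if pvSep c then i else pvFindSep t (i + 1)

-- body of A's first loop; state = (pathDict['partID'], pathDict['edgeType'], preIndex)
def pvBodyA (s : List Char) (st : List Int × List Int × Int) (i : Int) : List Int × List Int × Int :=
  if pvSep (PySem.List.pyGetD s i ' ') then
    (st.1 ++ [pvInt (PySem.List.slice s (some st.2.2) (some i))],
     st.2.1 ++ [pvEdge (PySem.List.pyGetD s i ' ')],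
     i + 1)
  else st

def getPathDict (pathStr : String) : List (String × List Int) :=
  let s := pathStr.toList
  let st := (PySem.List.pyRange 0 (s.length : Int) 1).foldl (pvBodyA s) ([], [], 0)
  let pathTem := s.reverse   -- pathStr[::-1]; exact by PySem.List.slice?_none_none_neg_one
  let idx := pvFindSep pathTem 0
  [("partID", st.1 ++ [pvInt (PySem.List.slice s (some (-idx)) none)]),
   ("edgeType", st.2.1)]

-- ===== PORT B =====
-- body of B's single pass; state = (segments, edgeType, cur)
def pvBodyB (st : List (List Char) × List Int × List Char) (ch : Char) :
    List (List Char) × List Int × List Char :=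
  if pvSep ch then (st.1 ++ [st.2.2], st.2.1 ++ [pvEdge ch], [])
  else (st.1, st.2.1, st.2.2 ++ [ch])

def getPathDict_alt (pathStr : String) : List (String × List Int) :=
  let st := pathStr.toList.foldl pvBodyB ([], [], [])
  let segments := st.1 ++ [st.2.2]
  [("partID", segments.map pvInt), ("edgeType", st.2.1)]

-- ===== PRECONDITION & SPEC =====
-- Pre_: every chunk of pathStr between/around 'S'/'C' separators parses as a Python
-- int — exactly the inputs where A's int() calls all succeed (elsewhere A raises ValueError).
def Pre_getPathDict (pathStr : String) : Prop :=
  ∀ seg ∈ pathStr.toList.splitOnP pvSep, (PySem.Int.ofChars? seg).isSome = true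
instance (pathStr : String) : Decidable (Pre_getPathDict pathStr) := by
  unfold Pre_getPathDict; infer_instance

def pvWitness_getPathDict : String := "12S34C56"

def Spec_getPathDict (pathStr : String) (out : List (String × List Int)) : Prop := out = getPathDict_alt pathStr
instance (pathStr : String) (out : List (String × List Int)) : Decidable (Spec_getPathDict pathStr out) := by unfold Spec_getPathDict; infer_instance

-- ===== CLAIM (what is proved, stated in full; the proofs are below) =====
def Claim_equal_getPathDict : Prop := ∀ (pathStr : String), Dom_getPathDict pathStr → Pre_getPathDict pathStr → Spec_getPathDict pathStr (getPathDict pathStr)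

-- ===== LEMMAS AND PROOFS =====

-- B's fold computes the splitOnP decomposition: accumulated segments, edges, and current chunk
lemma foldB_eq (t : List Char) : ∀ (segs : List (List Char)) (edge : List Int) (cur : List Char),
    t.foldl pvBodyB (segs, edge, cur)
      = (segs ++ ((t.splitOnP pvSep).modifyHead (cur ++ ·)).dropLast,
         edge ++ (t.filter pvSep).map pvEdge,
         ((t.splitOnP pvSep).modifyHead (cur ++ ·)).getLastD []) := by
  induction t with
  | nil => intro segs edge cur; simp [List.splitOnP_nil]
  | cons c t ih =>
    intro segs edge cur
    by_cases h : pvSep c = true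
    · have hne := List.splitOnP_ne_nil pvSep t
      simp only [List.foldl_cons, pvBodyB, h, if_pos, List.splitOnP_cons, ih,
        List.modifyHead_cons, List.append_nil]
      rw [show ((fun x => ([] : List Char) ++ x)) = id from by funext x; simp]
      rcases List.exists_cons_of_ne_nil hne with ⟨a, l, hal⟩
      simp [hal, List.append_assoc, h]
    · simp only [List.foldl_cons, pvBodyB, h, if_neg, Bool.not_eq_true, ih,
        List.splitOnP_cons]
      rw [List.modifyHead_modifyHead]
      simp [h, Function.comp_def]

-- the reverse scan: no separator present ⇒ idx stays 0
lemma pvFindSep_no_sep (l : List Char) (h : ∀ c ∈ l, pvSep c = false) :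
    ∀ i, pvFindSep l i = 0 := by
  induction l with
  | nil => intro i; rfl
  | cons c t ih =>
    intro i
    simp only [pvFindSep, h c (List.mem_cons_self ..)]
    exact ih (fun x hx => h x (List.mem_cons_of_mem _ hx)) (i + 1)

-- the reverse scan: first separator after a separator-free prefix
lemma pvFindSep_append (u : List Char) (d : Char) (v : List Char)
    (hu : ∀ c ∈ u, pvSep c = false) (hd : pvSep d = true) :
    ∀ i, pvFindSep (u ++ d :: v) i = i + (u.length : Int) := by
  induction u with
  | nil => intro i; simp [pvFindSep, hd]
  | cons c t ih =>
    intro i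
    simp only [List.cons_append, pvFindSep, hu c (List.mem_cons_self ..)]
    rw [ih (fun x hx => hu x (List.mem_cons_of_mem _ hx)) (i + 1)]
    simp
    ring

-- A's index/slice loop simulates B's one-pass fold
lemma foldA_eq (t : List Char) : ∀ (s : List Char) (j pre : Nat)
    (segs : List (List Char)) (edge : List Int),
    s.drop j = t → pre ≤ j → j ≤ s.length →
    (∀ c ∈ (s.drop pre).take (j - pre), pvSep c = false) →
    (pre = 0 ∨ 0 < pre ∧ ∃ d, s[pre-1]? = some d ∧ pvSep d = true) →
    ∃ preF : Nat, preF ≤ s.length ∧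
      (PySem.List.pyRange (j : Int) (s.length : Int) 1).foldl (pvBodyA s)
          (segs.map pvInt, edge, (pre : Int))
        = ((t.foldl pvBodyB (segs, edge, (s.drop pre).take (j - pre))).1.map pvInt,
           (t.foldl pvBodyB (segs, edge, (s.drop pre).take (j - pre))).2.1,
           (preF : Int)) ∧
      (t.foldl pvBodyB (segs, edge, (s.drop pre).take (j - pre))).2.2 = s.drop preF ∧
      (∀ c ∈ s.drop preF, pvSep c = false) ∧
      (preF = 0 ∨ 0 < preF ∧ ∃ d, s[preF-1]? = some d ∧ pvSep d = true) := by
  induction t with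
  | nil =>
    intro s j pre segs edge hdrop hpj hjlen hfree hbd
    have hlen : s.length ≤ j := by
      have := List.drop_eq_nil_iff.mp hdrop; omega
    have hj : j = s.length := le_antisymm hjlen hlen
    have hrange : PySem.List.pyRange (j : Int) (s.length : Int) 1 = [] := by
      subst hj; simp [PySem.List.pyRange]
    have hcur : (s.drop pre).take (j - pre) = s.drop pre := by
      apply List.take_of_length_le; simp; omega
    refine ⟨pre, by omega, ?_, ?_, ?_, hbd⟩
    · rw [hrange]; simp
    · simp [hcur]
    · intro c hc; exact hfree c (by rw [hcur]; exact hc)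
  | cons c t ih =>
    intro s j pre segs edge hdrop hpj hjlen hfree hbd
    have hjlt : j < s.length := by
      have h1 : (s.drop j).length = s.length - j := List.length_drop ..
      rw [hdrop] at h1; simp at h1; omega
    have hgj : s[j]? = some c := by
      have : (s.drop j)[0]? = some c := by rw [hdrop]; rfl
      simpa using this
    have hget : PySem.List.pyGetD s (j : Int) ' ' = c := by
      rw [PySem.List.pyGetD_natCast]
      simp [List.getD, hgj]
    have hdrop' : s.drop (j+1) = t := by
      have : (s.drop j).tail = t := by rw [hdrop]; rfl
      rw [← this, List.tail_drop]
    have hrange : PySem.List.pyRange (j : Int) (s.length : Int) 1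
        = (j : Int) :: PySem.List.pyRange ((j : Int) + 1) (s.length : Int) 1 :=
      PySem.List.pyRange_one_cons (by exact_mod_cast hjlt)
    rw [hrange, List.foldl_cons]
    by_cases hsep : pvSep c = true
    · -- separator step
      have hslice : PySem.List.slice s (some (pre : Int)) (some (j : Int))
          = (s.drop pre).take (j - pre) := PySem.List.slice_natCast ..
      have hbody : pvBodyA s (segs.map pvInt, edge, (pre : Int)) (j : Int)
          = ((segs ++ [(s.drop pre).take (j - pre)]).map pvInt,
             edge ++ [pvEdge c], ((j+1 : Nat) : Int)) := by
        simp [pvBodyA, hget, hsep, hslice]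
      rw [hbody]
      have hcast : ((j : Int) + 1) = ((j+1 : Nat) : Int) := by push_cast; ring
      rw [hcast] at hrange ⊢
      obtain ⟨preF, h1, h2, h3, h4, h5⟩ :=
        ih s (j+1) (j+1) (segs ++ [(s.drop pre).take (j - pre)]) (edge ++ [pvEdge c])
          hdrop' (le_refl _) (by omega)
          (by simp)
          (Or.inr ⟨by omega, c, by simpa using hgj, hsep⟩)
      refine ⟨preF, h1, ?_, ?_, h4, h5⟩
      · rw [h2]
        simp [pvBodyB, hsep]
      · rw [← h3]
        simp [pvBodyB, hsep]
    · -- non-separator step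
      have hbody : pvBodyA s (segs.map pvInt, edge, (pre : Int)) (j : Int)
          = (segs.map pvInt, edge, (pre : Int)) := by
        simp [pvBodyA, hget, hsep]
      rw [hbody]
      have hcurstep : (s.drop pre).take (j + 1 - pre)
          = (s.drop pre).take (j - pre) ++ [c] := by
        have h1 : j + 1 - pre = (j - pre) + 1 := by omega
        rw [h1, List.take_add_one]
        have h2 : (s.drop pre)[j - pre]? = some c := by
          rw [List.getElem?_drop]
          have : pre + (j - pre) = j := by omega
          rw [this, hgj]
        rw [h2]; rfl
      obtain ⟨preF, h1, h2, h3, h4, h5⟩ :=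
        ih s (j+1) pre segs edge hdrop' (by omega) (by omega)
          (by
            intro x hx
            rw [hcurstep] at hx
            rcases List.mem_append.mp hx with h | h
            · exact hfree x h
            · simp at h; subst h
              simpa using hsep)
          hbd
      push_cast at h2
      refine ⟨preF, h1, ?_, ?_, h4, h5⟩
      · rw [h2]
        simp [pvBodyB, hsep, hcurstep]
      · rw [← h3]
        simp [pvBodyB, hsep, hcurstep]

-- ===== VERDICT (by name: the statement is the Claim_ definition above) =====
-- the last segment B's fold carries is the last chunk of splitOnP, hence parseable under Pre_
lemma lastD_mem {α : Type} (X : List α) (d : α) (h : X ≠ []) : X.getLastD d ∈ X := by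
  rcases List.exists_cons_of_ne_nil h with ⟨a, t, rfl⟩
  simp only [List.getLastD_cons]
  exact List.getLastD_mem_cons

theorem getPathDict_spec : Claim_equal_getPathDict := by
  intro pathStr _ hpre
  simp only [Spec_getPathDict, getPathDict, getPathDict_alt]
  obtain ⟨preF, hle, hA, hcur, hfree, hbd⟩ :=
    foldA_eq (pathStr.toList) (pathStr.toList) 0 0 [] [] (by simp) (le_refl 0) (by simp)
      (by simp) (Or.inl rfl)
  simp only [List.drop_zero, Nat.sub_zero, List.take_zero, List.map_nil, Nat.cast_zero] at hA hcur
  rw [hA]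
  -- identify the carried last chunk with splitOnP's last chunk
  have hB := foldB_eq (pathStr.toList) [] [] []
  have hid : (fun x => ([] : List Char) ++ x) = id := funext fun x => by simp
  rw [hid, List.modifyHead_id] at hB
  have hXne := List.splitOnP_ne_nil pvSep pathStr.toList
  have hu : (PySem.Int.ofChars? (pathStr.toList.foldl pvBodyB ([], [], [])).2.2).isSome = true := by
    rw [hB]
    exact hpre _ (lastD_mem _ _ hXne)
  have hune : (pathStr.toList.foldl pvBodyB ([], [], [])).2.2 ≠ [] := by
    intro h
    rw [h] at hu
    rw [show PySem.Int.ofChars? ([] : List Char) = none from rfl] at hu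
    simp at hu
  -- reduce to the last-element equality
  simp only [List.map_append, List.map_cons, List.map_nil, List.cons.injEq, Prod.mk.injEq,
    List.append_cancel_left_eq, and_true, true_and]
  -- pvInt (slice from the reverse-scan index) = pvInt (last chunk)
  congr 1
  rcases hbd with h0 | ⟨hpos, d, hd, hdsep⟩
  · -- no separator anywhere: idx = 0 and the slice is the whole string
    subst h0
    simp only [List.drop_zero] at hcur hfree
    rw [pvFindSep_no_sep _ (fun c hc => hfree c (List.mem_reverse.mp hc)) 0]
    rw [show -(0:Int) = ((0:Nat):Int) from by simp, PySem.List.slice_from_natCast]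
    simp [hcur]
  · -- a separator exists: idx = length of the final chunk
    have hk : 0 < pathStr.toList.length - preF := by
      by_contra h
      have : pathStr.toList.drop preF = [] := List.drop_eq_nil_iff.mpr (by omega)
      rw [← hcur] at this
      exact hune this
    have h9 : pathStr.toList.take preF = pathStr.toList.take (preF-1) ++ [d] := by
      conv_lhs => rw [show preF = (preF-1)+1 from by omega]
      rw [List.take_add_one, hd]
      rfl
    have hsplit : pathStr.toList
        = (pathStr.toList.take (preF-1) ++ [d]) ++ pathStr.toList.drop preF := by
      rw [← h9, List.take_append_drop]
    have hrev : pathStr.toList.reverse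
        = (pathStr.toList.drop preF).reverse ++ d :: (pathStr.toList.take (preF-1)).reverse := by
      conv_lhs => rw [hsplit]
      simp
    rw [hrev, pvFindSep_append _ d _
      (fun c hc => hfree c (List.mem_reverse.mp hc)) hdsep 0]
    rw [List.length_reverse, List.length_drop, zero_add, PySem.List.slice_from_neg_natCast _ _ hk]
    rw [show pathStr.toList.length - (pathStr.toList.length - preF) = preF from by omega]
    exact hcur.symm
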